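-- pv_equiv track=rewrite | github.com/TrippleCCC/KavrakiLabWebApp | web_app/util/regex_util.py | create_peptide_regex
-- ===== SOURCE A (Python) =====
-- def create_peptide_regex(query):
--     # Split strings into letter position pairs
--     pairs = list(map(lambda p: p.strip(), query.split(",")))
--
--     # Define function for validating pairs
--     validate_pair = lambda p: len(p) == 2 and p[0].isalpha() and p[1].isdigit() and int(p[1]) > 0
--
--     # filter out invalid pairs
--     pairs = list(filter(validate_pair, pairs))
--
--     # Return a regex that matches nothing if there are no pairs
--     if not pairs:
--         return "$^"
--
--     # transform pairs to tuples
--     pairs = list(map(lambda p: [p[0].upper(), int(p[1])], pairs))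
--
--     # Now remove remove duplicate pairs and duplicate positions
--     final_pairs = []
--     seen_postions = set()
--     for pair in pairs:
--         if pair[1] in seen_postions:
--             continue
--         final_pairs.append(pair)
--         seen_postions.add(pair[1])
--
--     # Now convert pairs into regex
--     sort_function = lambda p: p[1]
--     final_pairs.sort(key=sort_function)
--
--     for i in reversed(range(1, len(final_pairs))):
--         prev_index = final_pairs[i-1][1]
--         curr_pair = final_pairs[i]
--         final_pairs[i] = [curr_pair[0], curr_pair[1]-prev_index]
--
--     for i in range(len(final_pairs)):
--         final_pairs[i][1] -= 1
--
--     regex_sections = list(map(lambda p: "{{{index}}}[{let}]".format(index=p[1], let=p[0]), final_pairs))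
--     final_regex = "^." + ".".join(regex_sections) + ".*"
--
--     return final_regex
-- ===== SOURCE B (Python) =====
-- def create_peptide_regex(query):
--     # A valid pair's position is a single digit, so positions can only be 1..9:
--     # use a fixed 10-slot table indexed by the digit (counting-sort style) and
--     # scan the slots 1..9 in order -- no sorting, no dedup set needed (the slot
--     # keeps the first letter seen for its position).
--     slots = [None] * 10
--     for part in query.split(","):
--         p = part.strip()
--         if len(p) == 2 and p[0].isalpha() and p[1].isdigit() and p[1] != "0":
--             i = ord(p[1]) - ord("0")
--             if slots[i] is None:
--                 slots[i] = p[0].upper()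
--     sections = []
--     prev = 0
--     for pos in range(1, 10):
--         letter = slots[pos]
--         if letter is not None:
--             sections.append("{%d}[%s]" % (pos - prev - 1, letter))
--             prev = pos
--     if not sections:
--         return "$^"
--     return "^." + ".".join(sections) + ".*"
-- ===== Notes on version B (the rewrite author's own statement) =====
-- stated objective: alternative
-- what changed: Exploits that a valid pair's position is a single digit (1-9): B replaces A's filter/map/dedup-set/sort/reverse-diff pipeline with a fixed 10-slot table indexed directly by the digit (counting-sort style, first letter wins) and a single in-order scan of slots 1..9 emitting each gap from a running previous position, so no sort and no dedup structure exist at all.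
import Mathlib
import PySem

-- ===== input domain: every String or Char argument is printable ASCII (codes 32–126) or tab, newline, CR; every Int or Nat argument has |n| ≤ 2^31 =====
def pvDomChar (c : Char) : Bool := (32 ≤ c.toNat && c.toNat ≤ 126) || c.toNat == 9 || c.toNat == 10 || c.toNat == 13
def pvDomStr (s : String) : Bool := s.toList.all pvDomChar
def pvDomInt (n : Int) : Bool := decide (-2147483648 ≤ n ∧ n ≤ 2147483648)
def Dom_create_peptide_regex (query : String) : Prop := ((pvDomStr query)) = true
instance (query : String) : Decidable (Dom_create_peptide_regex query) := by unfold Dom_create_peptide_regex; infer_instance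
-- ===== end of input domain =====

set_option maxRecDepth 8000

-- B exploits that a valid pair's position is a single digit (1..9): a fixed 10-slot
-- table indexed by the digit replaces A's filter/map/dedup-set/sort/reverse-diff
-- pipeline, and the regex is emitted by one in-order scan of the slots (objective:
-- alternative algorithm, no sort and no dedup structure).

-- ===== PORT A =====
-- the format string "{{{index}}}[{let}]" both Pythons share: "{gap}[letter]"
def pvSec (gap : Int) (letter : Char) : List Char :=
  '{' :: (PySem.Int.toChars gap ++ ('}' :: '[' :: letter :: [']']))

-- validate_pair: len(p)==2 and p[0].isalpha() and p[1].isdigit() and int(p[1])>0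
-- (the len(p)==2 test plus the p[0]/p[1] indexing is transliterated as a two-element match;
--  int(p[1]) cannot raise after isdigit, so getD 0 is exact)
def pvValidA : List Char → Bool
  | [c0, c1] => PySem.Chars.isalpha c0 && PySem.Chars.isdigit c1 &&
                decide (0 < (PySem.Int.ofChars? [c1]).getD 0)
  | _ => false

-- lambda p: [p[0].upper(), int(p[1])]
def pvToPairA : List Char → Char × Int
  | c0 :: c1 :: _ => (PySem.Chars.upperChar c0, (PySem.Int.ofChars? [c1]).getD 0)
  | _ => ('?', 0)  -- unreachable: only called on validated pairs

-- the dedup loop body over the state (final_pairs, seen_postions)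
def pvStepA (st : List (Char × Int) × PySem.Set Int) (pair : Char × Int) :
    List (Char × Int) × PySem.Set Int :=
  if PySem.Set.contains st.2 pair.2 then st
  else (st.1 ++ [pair], PySem.Set.add st.2 pair.2)

-- for i in reversed(range(1, len(final_pairs))): final_pairs[i] = [c, curr - prev]
-- (the indices final_pairs[i-1] / final_pairs[i] are always in range, so getD is exact)
def pvRevDiffA (l : List (Char × Int)) : List (Char × Int) :=
  ((PySem.List.pyRange 1 (l.length : Int) 1).reverse).foldl
    (fun fp i =>
      let prev_index := (fp.getD (i - 1).toNat ('?', 0)).2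
      let curr := fp.getD i.toNat ('?', 0)
      fp.set i.toNat (curr.1, curr.2 - prev_index))
    l

def create_peptide_regex (query : String) : String :=
  let pairs := (PySem.Chars.splitOn query.toList ",".toList).map (fun p => PySem.Chars.strip p)
  let pairs := pairs.filter pvValidA
  if pairs = [] then "$^"
  else
    let pairs := pairs.map pvToPairA
    let final_pairs := (pairs.foldl pvStepA ([], PySem.Set.ofList [])).1
    let final_pairs := PySem.List.sorted final_pairs (fun p => p.2)
    let final_pairs := pvRevDiffA final_pairs
    let final_pairs := final_pairs.map (fun p => (p.1, p.2 - 1))  -- the "-= 1" index loop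
    let regex_sections := final_pairs.map (fun p => pvSec p.2 p.1)
    String.ofList ("^.".toList ++ PySem.Chars.join ['.'] regex_sections ++ ".*".toList)

-- ===== PORT B =====
-- loop body: strip, validate, store the first letter seen into the slot the digit indexes
-- (slots[i] with i = ord(p[1]) - ord('0') is always in range 1..9 after isdigit/!='0',
--  so getD/set is exact)
def pvSlotStep (slots : List (Option Char)) (part : List Char) : List (Option Char) :=
  match PySem.Chars.strip part with
  | [c0, c1] =>
    if PySem.Chars.isalpha c0 && PySem.Chars.isdigit c1 && (c1 != '0') then
      let i := c1.toNat - 48          -- ord(p[1]) - ord("0")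
      if slots.getD i none = none then slots.set i (some (PySem.Chars.upperChar c0)) else slots
    else slots
  | _ => slots

-- body of "for pos in range(1, 10)" over the state (sections, prev)
def pvEmitB (slots : List (Option Char)) (st : List (List Char) × Int) (pos : Int) :
    List (List Char) × Int :=
  match slots.getD pos.toNat none with
  | none => st
  | some letter => (st.1 ++ [pvSec (pos - st.2 - 1) letter], pos)

def create_peptide_regex_alt (query : String) : String :=
  let slots := (PySem.Chars.splitOn query.toList ",".toList).foldl pvSlotStep
                 (List.replicate 10 none)
  let sections := ((PySem.List.pyRange 1 10 1).foldl (pvEmitB slots) ([], 0)).1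
  if sections = [] then "$^"
  else String.ofList ("^.".toList ++ PySem.Chars.join ['.'] sections ++ ".*".toList)

-- ===== PRECONDITION & SPEC =====
def Spec_create_peptide_regex (query : String) (out : String) : Prop := out = create_peptide_regex_alt query
instance (query : String) (out : String) : Decidable (Spec_create_peptide_regex query out) := by unfold Spec_create_peptide_regex; infer_instance

-- ===== CLAIM (what is proved, stated in full; the proofs are below) =====
def Claim_equal_create_peptide_regex : Prop := ∀ (query : String), Dom_create_peptide_regex query → Spec_create_peptide_regex query (create_peptide_regex query)

-- ===== LEMMAS AND PROOFS =====

-- A's validate+convert per piece, as one partial parse (proof helper)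
def pvParse (p : List Char) : Option (Char × Int) :=
  if pvValidA p then some (pvToPairA p) else none

-- B's slot update on an already-parsed pair (proof helper)
def pvSlotAbs (slots : List (Option Char)) (x : Char × Int) : List (Option Char) :=
  if slots.getD x.2.toNat none = none then slots.set x.2.toNat (some x.1) else slots

-- first letter recorded for position n in a dedup list (proof helper)
def pvLook (l : List (Char × Int)) (n : Int) : Option Char :=
  (l.find? (fun p => p.2 == n)).map (·.1)

-- the common section list: a forward pass with a running previous position
def pvSecs (prev : Int) : List (Char × Int) → List (List Char)
  | [] => []
  | (c, n) :: t => pvSec (n - prev - 1) c :: pvSecs n t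

-- A's tail computation (reverse diff, subtract 1, format)
def pvTailA (l : List (Char × Int)) : List (List Char) :=
  ((pvRevDiffA l).map (fun p => (p.1, p.2 - 1))).map (fun p => pvSec p.2 p.1)

-- On an ASCII digit, Python's int(c) is ord(c) - 48
lemma pv_digit_val (c : Char) (h : PySem.Chars.isdigit c = true) :
    PySem.Int.ofChars? [c] = some ((c.toNat : Int) - 48) := by
  simp only [PySem.Chars.isdigit, Bool.and_eq_true, decide_eq_true_eq] at h
  obtain ⟨h1, h2⟩ := h
  have hb1 : 48 ≤ c.toNat := h1
  have hb2 : c.toNat ≤ 57 := h2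
  have hc : c = Char.ofNat c.toNat := (Char.ofNat_toNat c).symm
  set n := c.toNat with hn
  clear_value n
  interval_cases n <;> (rw [hc]; decide)

-- On an ASCII digit, Python's "int(c) > 0" is exactly "c != '0'"
lemma pv_digit_cond (c : Char) (h : PySem.Chars.isdigit c = true) :
    decide (0 < (PySem.Int.ofChars? [c]).getD 0) = (c != '0') := by
  simp only [PySem.Chars.isdigit, Bool.and_eq_true, decide_eq_true_eq] at h
  obtain ⟨h1, h2⟩ := h
  have hb1 : 48 ≤ c.toNat := h1
  have hb2 : c.toNat ≤ 57 := h2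
  have hc : c = Char.ofNat c.toNat := (Char.ofNat_toNat c).symm
  set n := c.toNat with hn
  clear_value n
  interval_cases n <;> (rw [hc]; decide)

-- B's per-part step is parse-then-abstract-slot-update
lemma pv_slotStep_eq (slots : List (Option Char)) (part : List Char) :
    pvSlotStep slots part =
      (match pvParse (PySem.Chars.strip part) with
       | none => slots
       | some x => pvSlotAbs slots x) := by
  unfold pvSlotStep pvParse pvSlotAbs
  cases hp : PySem.Chars.strip part with
  | nil => simp [pvValidA]
  | cons c0 t =>
    cases t with
    | nil => simp [pvValidA]
    | cons c1 t2 =>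
      cases t2 with
      | nil =>
        by_cases ha : PySem.Chars.isalpha c0 = true
        · by_cases hd : PySem.Chars.isdigit c1 = true
          · by_cases hz : (c1 != '0') = true
            · have hv := pv_digit_val c1 hd
              have hdig : PySem.Chars.isdigit c1 = true := hd
              simp only [PySem.Chars.isdigit, Bool.and_eq_true, decide_eq_true_eq] at hdig
              have htn : ((c1.toNat : Int) - 48).toNat = c1.toNat - 48 := by omega
              have hb1 : 48 ≤ c1.toNat := hdig.1
              have hne : c1.toNat ≠ 48 := by
                intro h
                have h0 : c1 ≠ '0' := by simpa using hz
                apply h0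
                have hcc : c1 = Char.ofNat c1.toNat := (Char.ofNat_toNat c1).symm
                rw [h] at hcc
                rw [hcc]
              have hcond : (decide ((0:Int) < (c1.toNat : Int) - 48)) = true := by
                simp only [decide_eq_true_eq]; omega
              simp only [pvValidA, ha, hd, Bool.true_and, hv, Option.getD_some, pvToPairA,
                hcond, hz, if_true]
              simp [htn]
            · simp [pvValidA, ha, hd, hz, pv_digit_cond c1 hd]
          · simp [pvValidA, ha, hd]
        · simp [pvValidA, ha]
      | cons _ _ => simp [pvValidA]

-- folding the parse-match is folding over the parsed pieces (generic in the step)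
lemma pv_foldl_parse {σ : Type} (f : σ → Char × Int → σ) (L : List (List Char)) (s : σ) :
    L.foldl (fun s p => (match pvParse p with | none => s | some x => f s x)) s
      = (L.filterMap pvParse).foldl f s := by
  induction L generalizing s with
  | nil => rfl
  | cons p t ih =>
    cases hp : pvParse p <;> simp [hp, ih]

lemma pv_filter_map_eq (l : List (List Char)) :
    (l.filter pvValidA).map pvToPairA = l.filterMap pvParse := by
  induction l with
  | nil => rfl
  | cons p t ih =>
    by_cases h : pvValidA p = true <;> simp [pvParse, h, ih]

-- every parsed pair's position is a digit value 1..9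
lemma pv_parse_pos (p : List Char) (x : Char × Int) (h : pvParse p = some x) :
    1 ≤ x.2 ∧ x.2 ≤ 9 := by
  unfold pvParse at h
  by_cases hv : pvValidA p = true
  · rw [if_pos hv] at h
    cases p with
    | nil => simp [pvValidA] at hv
    | cons c0 t =>
      cases t with
      | nil => simp [pvValidA] at hv
      | cons c1 t2 =>
        cases t2 with
        | nil =>
          simp only [pvValidA, Bool.and_eq_true, decide_eq_true_eq] at hv
          obtain ⟨⟨_, hd⟩, hpos⟩ := hv
          have hv2 := pv_digit_val c1 hd
          have hdig := hd
          simp only [PySem.Chars.isdigit, Bool.and_eq_true, decide_eq_true_eq] at hdig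
          have hx : x = (PySem.Chars.upperChar c0, (PySem.Int.ofChars? [c1]).getD 0) := by
            cases h; rfl
          have hb1 : 48 ≤ c1.toNat := hdig.1
          have hb2 : c1.toNat ≤ 57 := hdig.2
          rw [hx]
          simp only [hv2, Option.getD_some] at hpos ⊢
          omega
        | cons _ _ => simp [pvValidA] at hv
  · rw [if_neg hv] at h; cases h

lemma pv_look_append (acc : List (Char × Int)) (x : Char × Int) (n : Int) :
    pvLook (acc ++ [x]) n =
      (match pvLook acc n with
       | some c => some c
       | none => if x.2 == n then some x.1 else none) := by
  unfold pvLook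
  rw [List.find?_append]
  cases h : List.find? (fun p => p.2 == n) acc with
  | some q => simp
  | none =>
    simp only [Option.none_or]
    simp [List.find?]
    split <;> simp_all

lemma pv_look_none (acc : List (Char × Int)) (n : Int) :
    pvLook acc n = none ↔ n ∉ acc.map (·.2) := by
  unfold pvLook
  cases h : List.find? (fun p => p.2 == n) acc with
  | some q =>
    have hq1 := List.mem_of_find?_eq_some h
    have hq2 := List.find?_some h
    simp only [Option.map_some]
    constructor
    · intro hc; simp at hc
    · intro hnot
      exfalso
      apply hnot
      rw [List.mem_map]
      exact ⟨q, hq1, by simpa using hq2⟩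
  | none =>
    simp only [Option.map_none]
    constructor
    · intro _ hmem
      rw [List.mem_map] at hmem
      obtain ⟨p, hpmem, hpn⟩ := hmem
      have := List.find?_eq_none.mp h p hpmem
      simp [hpn] at this
    · intro _; trivial

-- the dedup fold of A and the slot-table fold of B stay in lockstep
lemma pv_table_inv (L : List (Char × Int)) (acc : List (Char × Int)) (slots : List (Option Char))
    (hL : ∀ x ∈ L, 1 ≤ x.2 ∧ x.2 ≤ 9)
    (hlen : slots.length = 10)
    (hacc : ∀ n : Int, 0 ≤ n → n ≤ 9 → slots.getD n.toNat none = pvLook acc n)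
    (hnd : (acc.map (·.2)).Nodup)
    (hpos : ∀ x ∈ acc, 1 ≤ x.2 ∧ x.2 ≤ 9) :
    (L.foldl pvSlotAbs slots).length = 10
    ∧ (∀ n : Int, 0 ≤ n → n ≤ 9 →
        (L.foldl pvSlotAbs slots).getD n.toNat none
          = pvLook (L.foldl pvStepA (acc, (acc.map (·.2) : List Int))).1 n)
    ∧ ((L.foldl pvStepA (acc, (acc.map (·.2) : List Int))).1.map (·.2)).Nodup
    ∧ (∀ x ∈ (L.foldl pvStepA (acc, (acc.map (·.2) : List Int))).1, 1 ≤ x.2 ∧ x.2 ≤ 9) := by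
  induction L generalizing acc slots with
  | nil => exact ⟨hlen, hacc, hnd, hpos⟩
  | cons x t ih =>
    have hx := hL x (List.mem_cons_self ..)
    have hL' : ∀ y ∈ t, 1 ≤ y.2 ∧ y.2 ≤ 9 := fun y hy => hL y (List.mem_cons_of_mem _ hy)
    rw [List.foldl_cons, List.foldl_cons]
    by_cases hm : x.2 ∈ acc.map (·.2)
    · have hlook : pvLook acc x.2 ≠ none := by
        rw [Ne, pv_look_none]; simpa using hm
      have hstepA : pvStepA (acc, (acc.map (·.2) : List Int)) x
          = (acc, (acc.map (·.2) : List Int)) := by simp [pvStepA, hm]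
      have hstepB : pvSlotAbs slots x = slots := by
        unfold pvSlotAbs
        rw [hacc x.2 (by omega) (by omega)]
        simp [hlook]
      rw [hstepA, hstepB]
      exact ih acc slots hL' hlen hacc hnd hpos
    · have hlook : pvLook acc x.2 = none := (pv_look_none acc x.2).mpr (by simpa using hm)
      have hstepA : pvStepA (acc, (acc.map (·.2) : List Int)) x
          = (acc ++ [x], ((acc ++ [x]).map (·.2) : List Int)) := by
        simp [pvStepA, hm, PySem.Set.add]
      have hstepB : pvSlotAbs slots x = slots.set x.2.toNat (some x.1) := by
        unfold pvSlotAbs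
        rw [hacc x.2 (by omega) (by omega), hlook]
        simp
      have hlen' : (slots.set x.2.toNat (some x.1)).length = 10 := by simp [hlen]
      have hacc' : ∀ n : Int, 0 ≤ n → n ≤ 9 →
          (slots.set x.2.toNat (some x.1)).getD n.toNat none = pvLook (acc ++ [x]) n := by
        intro n hn0 hn9
        rw [pv_look_append]
        by_cases hne : n = x.2
        · subst hne
          have hlt : x.2.toNat < slots.length := by omega
          rw [hlook]
          unfold List.getD
          rw [List.getElem?_set_self hlt]
          simp
        · have hidx : n.toNat ≠ x.2.toNat := by omega
          have hbeq : (x.2 == n) = false := by simp [Ne.symm hne]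
          unfold List.getD
          rw [List.getElem?_set_ne (by omega)]
          have := hacc n hn0 hn9
          unfold List.getD at this
          rw [this, hbeq]
          cases pvLook acc n <;> simp
      have hnd' : ((acc ++ [x]).map (·.2)).Nodup := by
        simp only [List.map_append, List.map_cons, List.map_nil]
        exact List.Nodup.append hnd (List.nodup_singleton _)
          (by simpa [List.disjoint_singleton] using hm)
      have hpos' : ∀ y ∈ acc ++ [x], 1 ≤ y.2 ∧ y.2 ≤ 9 := by
        intro y hy
        rcases List.mem_append.mp hy with h | h
        · exact hpos y h
        · simp at h; subst h; exact hx
      rw [hstepA, hstepB]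
      exact ih (acc ++ [x]) (slots.set x.2.toNat (some x.1)) hL' hlen' hacc' hnd' hpos'

lemma pv_dedup_ne_nil (L : List (Char × Int)) (acc : List (Char × Int)) (s : PySem.Set Int) :
    acc <+: (L.foldl pvStepA (acc, s)).1 := by
  induction L generalizing acc s with
  | nil => exact List.prefix_refl _
  | cons x t ih =>
    rw [List.foldl_cons]
    by_cases hm : x.2 ∈ s
    · have hstep : pvStepA (acc, s) x = (acc, s) := by simp [pvStepA, hm]
      rw [hstep]; exact ih acc s
    · have hstep : pvStepA (acc, s) x = (acc ++ [x], PySem.Set.add s x.2) := by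
        simp [pvStepA, hm]
      rw [hstep]; exact (List.prefix_append acc [x]).trans (ih _ _)

lemma pv_secs_append (l : List (Char × Int)) (prev : Int) (c : Char) (n : Int) :
    pvSecs prev (l ++ [(c, n)])
      = pvSecs prev l ++ [pvSec (n - (l.map (·.2)).getLastD prev - 1) c] := by
  induction l generalizing prev with
  | nil => simp [pvSecs]
  | cons p t ih =>
    obtain ⟨pc, pn⟩ := p
    simp only [List.cons_append, pvSecs, ih pn, List.map_cons, List.getLastD_cons]

-- a fold whose indices stay inside l does not touch an appended element
lemma pv_fold_frozen (is : List Int) (l : List (Char × Int)) (y : Char × Int)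
    (h : ∀ i ∈ is, 1 ≤ i ∧ i < (l.length : Int)) :
    (is.foldl (fun fp i =>
      let prev_index := (fp.getD (i - 1).toNat ('?', 0)).2
      let curr := fp.getD i.toNat ('?', 0)
      fp.set i.toNat (curr.1, curr.2 - prev_index)) (l ++ [y]))
    = (is.foldl (fun fp i =>
      let prev_index := (fp.getD (i - 1).toNat ('?', 0)).2
      let curr := fp.getD i.toNat ('?', 0)
      fp.set i.toNat (curr.1, curr.2 - prev_index)) l) ++ [y] := by
  induction is generalizing l with
  | nil => rfl
  | cons i t ih =>
    obtain ⟨h1, h2⟩ := h i (List.mem_cons_self ..)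
    have hi : i.toNat < l.length := by omega
    have hi1 : (i - 1).toNat < l.length := by omega
    rw [List.foldl_cons, List.foldl_cons]
    have hg1 : (l ++ [y]).getD (i - 1).toNat ('?', 0) = l.getD (i - 1).toNat ('?', 0) := by
      unfold List.getD; rw [List.getElem?_append_left hi1]
    have hg2 : (l ++ [y]).getD i.toNat ('?', 0) = l.getD i.toNat ('?', 0) := by
      unfold List.getD; rw [List.getElem?_append_left hi]
    have hset : ∀ v, (l ++ [y]).set i.toNat v = l.set i.toNat v ++ [y] := by
      intro v; rw [List.set_append_left _ _ hi]
    simp only [hg1, hg2, hset]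
    rw [ih]
    intro j hj
    have := h j (List.mem_cons_of_mem _ hj)
    simpa using this

lemma pv_revdiff_append (l : List (Char × Int)) (x : Char × Int) (hl : l ≠ []) :
    pvRevDiffA (l ++ [x]) = pvRevDiffA l ++ [(x.1, x.2 - (l.getLast hl).2)] := by
  unfold pvRevDiffA
  have hn : 1 ≤ (l.length : Int) := by
    have := List.length_pos_iff.mpr hl; omega
  have hlen : ((l ++ [x]).length : Int) = (l.length : Int) + 1 := by simp
  rw [hlen, PySem.List.pyRange_one_succ_right hn, List.reverse_append]
  simp only [List.reverse_cons, List.reverse_nil, List.nil_append, List.singleton_append,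
    List.foldl_cons]
  have hi : ((l.length : Int)).toNat = l.length := by omega
  have hg1 : (l ++ [x]).getD ((l.length : Int) - 1).toNat ('?', 0) = l.getLast hl := by
    have h1 : ((l.length : Int) - 1).toNat = l.length - 1 := by omega
    have h2 : l.length - 1 < l.length := by
      have := List.length_pos_iff.mpr hl; omega
    unfold List.getD
    rw [h1, List.getElem?_append_left h2]
    rw [List.getElem?_eq_getElem h2]
    simp [List.getLast_eq_getElem]
  have hg2 : (l ++ [x]).getD ((l.length : Int)).toNat ('?', 0) = x := by
    unfold List.getD
    rw [hi]
    simp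
  have hset : ∀ v, (l ++ [x]).set ((l.length : Int)).toNat v = l ++ [v] := by
    intro v
    rw [hi]
    rw [List.set_append_right _ _ (le_refl _)]
    simp
  rw [hg1, hg2, hset]
  rw [pv_fold_frozen]
  · intro i hi2
    rw [List.mem_reverse] at hi2
    have := PySem.List.mem_pyRange_one.mp hi2
    omega

-- A's three-stage tail equals the single forward gap pass
lemma pv_tail_eq (l : List (Char × Int)) : pvTailA l = pvSecs 0 l := by
  induction l using List.reverseRecOn with
  | nil => rfl
  | append_singleton t x ih =>
    obtain ⟨c, n⟩ := x
    rcases eq_or_ne t [] with rfl | ht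
    · simp only [List.nil_append]
      unfold pvTailA pvRevDiffA
      simp [PySem.List.pyRange, pvSecs]
    · unfold pvTailA
      rw [pv_revdiff_append t (c, n) ht]
      rw [List.map_append, List.map_append]
      rw [pv_secs_append]
      rw [← pvTailA, ih]
      congr 2
      rw [List.getLastD_eq_getLast?, List.getLast?_map, List.getLast?_eq_some_getLast ht]
      simp

-- membership in pvLook for a position-nodup list
lemma pv_look_mem (final : List (Char × Int)) (hnd : (final.map (·.2)).Nodup)
    (c : Char) (n : Int) :
    pvLook final n = some c ↔ (c, n) ∈ final := by
  constructor
  · intro h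
    unfold pvLook at h
    cases hf : final.find? (fun p => p.2 == n) with
    | none => rw [hf] at h; cases h
    | some q =>
      rw [hf] at h
      have hq1 : q ∈ final := List.mem_of_find?_eq_some hf
      have hq2 := List.find?_some hf
      have hqn : q.2 = n := by simpa using hq2
      have hc : q.1 = c := by simpa using h
      have : q = (c, n) := by
        cases q; simp_all
      rw [← this]; exact hq1
  · intro h
    unfold pvLook
    cases hf : final.find? (fun p => p.2 == n) with
    | none =>
      exfalso
      have := List.find?_eq_none.mp hf (c, n) h
      simp at this
    | some q =>
      have hq1 : q ∈ final := List.mem_of_find?_eq_some hf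
      have hq2 := List.find?_some hf
      have hqn : q.2 = n := by simpa using hq2
      have heq : q = (c, n) := by
        have := List.inj_on_of_nodup_map hnd hq1 h (by simpa using hqn)
        exact this
      rw [heq]; rfl

-- the sorted dedup list is the slot table read back in index order
lemma pv_sorted_eq (final : List (Char × Int))
    (hnd : (final.map (·.2)).Nodup)
    (hpos : ∀ x ∈ final, 1 ≤ x.2 ∧ x.2 ≤ 9) :
    PySem.List.sorted final (fun p => p.2)
      = (PySem.List.pyRange 1 10 1).filterMap
          (fun i => (pvLook final i).map (fun c => (c, i))) := by
  set m := (PySem.List.pyRange 1 10 1).filterMap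
      (fun i => (pvLook final i).map (fun c => (c, i))) with hm
  have hmem : ∀ x : Char × Int, x ∈ m ↔ x ∈ final := by
    intro ⟨c, n⟩
    rw [hm]
    simp only [List.mem_filterMap, Option.map_eq_some_iff]
    constructor
    · rintro ⟨i, _, c', hlk, heq⟩
      injection heq with h1 h2
      subst h1; subst h2
      exact (pv_look_mem final hnd _ _).mp hlk
    · intro hin
      refine ⟨n, ?_, c, (pv_look_mem final hnd c n).mpr hin, rfl⟩
      have := hpos (c, n) hin
      rw [PySem.List.mem_pyRange_one]
      omega
  have hpw : m.Pairwise (fun a b : Char × Int => a.2 < b.2) := by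
    rw [hm]
    apply List.Pairwise.filterMap
    · intro a a' hlt b hb b' hb'
      simp only [Option.map_eq_some_iff] at hb hb'
      obtain ⟨c, _, rfl⟩ := hb
      obtain ⟨c', _, rfl⟩ := hb'
      exact hlt
    · have : PySem.List.pyRange 1 10 1 = [1,2,3,4,5,6,7,8,9] := by decide
      rw [this]; decide
  have hmnd : m.Nodup := hpw.imp (fun h => by intro he; subst he; omega)
  have hfnd : final.Nodup := hnd.of_map
  have hperm : m.Perm final := (List.perm_ext_iff_of_nodup hmnd hfnd).mpr hmem
  exact PySem.List.sorted_eq_of_perm_of_pairwise_lt _ _ _ hperm hpw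

-- B's emit loop is the forward gap pass over the present slots
lemma pv_emit_eq (slots : List (Option Char)) (r : List Int)
    (acc : List (List Char)) (prev : Int) :
    (r.foldl (pvEmitB slots) (acc, prev)).1
      = acc ++ pvSecs prev (r.filterMap
          (fun i => (slots.getD i.toNat none).map (fun c => (c, i)))) := by
  induction r generalizing acc prev with
  | nil => simp [pvSecs]
  | cons i t ih =>
    rw [List.foldl_cons]
    cases hg : slots.getD i.toNat none with
    | none => simp only [pvEmitB, hg, List.filterMap_cons, Option.map_none]; exact ih acc prev
    | some c =>
      simp only [pvEmitB, hg, List.filterMap_cons, Option.map_some, pvSecs]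
      rw [ih]
      simp

-- ===== VERDICT (by name: the statement is the Claim_ definition above) =====
set_option maxHeartbeats 1000000 in
theorem create_peptide_regex_spec : Claim_equal_create_peptide_regex := by
  intro query _
  unfold Spec_create_peptide_regex
  simp only [create_peptide_regex, create_peptide_regex_alt]
  set pieces := PySem.Chars.splitOn query.toList ",".toList with hp
  set stripped := pieces.map (fun p => PySem.Chars.strip p) with hs
  set L := stripped.filterMap pvParse with hL
  -- B's slot loop is the abstract slot fold over the parsed pieces
  have hslots : pieces.foldl pvSlotStep (List.replicate 10 none)
      = L.foldl pvSlotAbs (List.replicate 10 none) := by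
    rw [show pvSlotStep = (fun sl p =>
        (match pvParse (PySem.Chars.strip p) with
         | none => sl
         | some x => pvSlotAbs sl x)) from funext fun sl => funext fun p => pv_slotStep_eq sl p]
    rw [hL, hs, ← pv_foldl_parse, List.foldl_map]
  rw [hslots]
  have hLb : ∀ x ∈ L, 1 ≤ x.2 ∧ x.2 ≤ 9 := by
    intro x hx
    rw [hL, List.mem_filterMap] at hx
    obtain ⟨p, _, hpx⟩ := hx
    exact pv_parse_pos p x hpx
  have hinv := pv_table_inv L [] (List.replicate 10 none) hLb (by simp)
      (by intro n h0 h9; unfold List.getD; rw [List.getElem?_replicate_of_lt (by omega)]; rfl)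
      (by simp) (by simp)
  set final := (L.foldl pvStepA ([], (List.map (·.2) ([] : List (Char × Int)) : List Int))).1
    with hfinal
  obtain ⟨hlen10, hread, hnd, hpos⟩ := hinv
  have hemit := pv_emit_eq (L.foldl pvSlotAbs (List.replicate 10 none))
      (PySem.List.pyRange 1 10 1) [] 0
  have hfm : (PySem.List.pyRange 1 10 1).filterMap
        (fun i => ((L.foldl pvSlotAbs (List.replicate 10 none)).getD i.toNat none).map
          (fun c => (c, i)))
      = (PySem.List.pyRange 1 10 1).filterMap
        (fun i => (pvLook final i).map (fun c => (c, i))) := by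
    apply List.filterMap_congr
    intro i hi
    have hb := PySem.List.mem_pyRange_one.mp hi
    rw [hread i (by omega) (by omega)]
  by_cases hfe : stripped.filter pvValidA = []
  · -- no valid pairs: both return "$^"
    have hLnil : L = [] := by
      have := pv_filter_map_eq stripped
      rw [hfe] at this
      rw [hL, ← this]
      simp
    rw [if_pos hfe]
    have hsecs : ((PySem.List.pyRange 1 10 1).foldl
        (pvEmitB (L.foldl pvSlotAbs (List.replicate 10 none))) ([], 0)).1 = [] := by
      rw [hemit, hfm]
      have : final = [] := by rw [hfinal, hLnil]; rfl
      have hnone : ∀ i, pvLook final i = none := by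
        intro i; rw [this]; rfl
      simp [hnone, pvSecs]
    rw [hsecs]
    rfl
  · -- at least one valid pair
    have hLne : L ≠ [] := by
      intro h
      apply hfe
      have h2 := pv_filter_map_eq stripped
      rw [← hL] at h2
      rw [h] at h2
      exact List.map_eq_nil_iff.mp h2
    have hfinne : final ≠ [] := by
      rw [hfinal]
      obtain ⟨x, t, hxt⟩ := List.exists_cons_of_ne_nil hLne
      rw [hxt, List.foldl_cons]
      have hstep : pvStepA ([], (List.map (·.2) ([] : List (Char × Int)) : List Int)) x
          = ([x], [x.2]) := by simp [pvStepA, PySem.Set.contains, PySem.Set.add]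
      rw [hstep]
      intro h
      have := pv_dedup_ne_nil t [x] [x.2]
      rw [h] at this
      exact absurd (List.prefix_nil.mp this) (by simp)
    have hsecne : ((PySem.List.pyRange 1 10 1).foldl
        (pvEmitB (L.foldl pvSlotAbs (List.replicate 10 none))) ([], 0)).1 ≠ [] := by
      rw [hemit, hfm]
      obtain ⟨x, t, hxt⟩ := List.exists_cons_of_ne_nil hfinne
      have hxin : x ∈ final := by rw [hxt]; exact List.mem_cons_self ..
      have hxb := hpos x hxin
      have hlk : pvLook final x.2 = some x.1 := by
        apply (pv_look_mem final hnd x.1 x.2).mpr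
        simpa using hxin
      have hxr : x.2 ∈ PySem.List.pyRange 1 10 1 := by
        rw [PySem.List.mem_pyRange_one]; omega
      intro hempty
      have : (x.1, x.2) ∈ (PySem.List.pyRange 1 10 1).filterMap
          (fun i => (pvLook final i).map (fun c => (c, i))) := by
        rw [List.mem_filterMap]
        exact ⟨x.2, hxr, by rw [hlk]; rfl⟩
      rcases hsplit : (PySem.List.pyRange 1 10 1).filterMap
          (fun i => (pvLook final i).map (fun c => (c, i))) with _ | ⟨⟨c, n⟩, rest⟩
      · rw [hsplit] at this; simp at this
      · rw [hsplit] at hempty; simp [pvSecs] at hempty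
    rw [if_neg hfe, if_neg hsecne]
    -- both branches build the same section list
    have hmap : (stripped.filter pvValidA).map pvToPairA = L :=
      (pv_filter_map_eq stripped).trans hL.symm
    rw [hmap]
    have hsorted := pv_sorted_eq final hnd hpos
    have htail := pv_tail_eq (PySem.List.sorted final (fun p => p.2))
    unfold pvTailA at htail
    rw [hemit, hfm]
    rw [show (PySem.Set.ofList ([] : List Int) : PySem.Set Int)
        = (List.map (·.2) ([] : List (Char × Int)) : List Int) from rfl]
    rw [← hfinal, htail, hsorted]
    simp
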